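-- pv_equiv track=rewrite | github.com/republicroad/zen-rule | src/zen_rule/custom/func_parser.py | parse_func_arguments
-- ===== SOURCE A (Python) =====
-- from dataclasses import dataclass, asdict, field
--
-- @dataclass
-- class FuncT:
--     """
--         zen expression object type
--         map(['a', 'b', 'c'], # + '!')
--     """
--     name: str
--     token_type: str = "function"
--     Func_LEFT : str = "("
--     Func_RIGHT: str = ")"
--     Func_ARGS_SEP  = ","
--
--     @classmethod
--     def predict(cls, c, stack):
--         """
--             因为字符串的识别是在词法作用解析时识别, 所以需要判断逗号是否在引号中.
--             # if StringT.predict_str_part(c, _mystack):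
--             #     # 如果当前字符是逗号, 需要查看当前栈底是否有 ' 或者 " 符号, 如果是引号内的逗号, 那么此逗号不是参数的分隔符. 当前逗号是字符串的一部分，所以需要入栈.
--             #     _mystack.append(c)
--             #     # 数组不是原子类型，数组在语法解析中完成.
--         """
--         predict_funcion_meta =  c in {cls.Func_LEFT, cls.Func_RIGHT, cls.Func_ARGS_SEP}
--         if predict_funcion_meta:
--             if StringT.predict_str_part(c, stack):
--                 return False
--             else:
--                 return True
--         else:
--             return False
--
--     @classmethod
--     def predict_func_call(cls, c):
--         return c in {"(", ")"}
--
--     @classmethod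
--     def predict_func_define(cls, c):
--         pass
--
-- def parse_func_arguments(stack):
--     stop_chars = (FuncT.Func_LEFT,)
--     l = []
--     token = ""
--     while(stack and token not in stop_chars):
--         token = stack.pop()
--         l.append(token)
--     if stack:
--         # pop function name
--         l.append(stack.pop())
--     l.reverse()
--     # logger.debug("token:", token)
--     return l
-- ===== SOURCE B (Python) =====
-- def parse_func_arguments(stack):
--     # Locate the last "(" by scanning the reversed stack once, then take/remove
--     # the whole suffix in one slice instead of popping token by token.
--     n = len(stack)
--     try:
--         k = stack[::-1].index("(") + 1   # tokens up to and including the "("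
--         if k < n:
--             k += 1                        # include the function name below the "("
--     except ValueError:
--         k = n                             # no "(": the whole stack is consumed
--     result = stack[n - k:]
--     del stack[n - k:]
--     return result
-- ===== Notes on version B (the rewrite author's own statement) =====
-- stated objective: alternative
-- what changed: Replaces A's one-token-at-a-time pop/append/reverse loop by a single scan locating the last '(' and one suffix slice returned in original order (same mutation of the caller's list).
import Mathlib
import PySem

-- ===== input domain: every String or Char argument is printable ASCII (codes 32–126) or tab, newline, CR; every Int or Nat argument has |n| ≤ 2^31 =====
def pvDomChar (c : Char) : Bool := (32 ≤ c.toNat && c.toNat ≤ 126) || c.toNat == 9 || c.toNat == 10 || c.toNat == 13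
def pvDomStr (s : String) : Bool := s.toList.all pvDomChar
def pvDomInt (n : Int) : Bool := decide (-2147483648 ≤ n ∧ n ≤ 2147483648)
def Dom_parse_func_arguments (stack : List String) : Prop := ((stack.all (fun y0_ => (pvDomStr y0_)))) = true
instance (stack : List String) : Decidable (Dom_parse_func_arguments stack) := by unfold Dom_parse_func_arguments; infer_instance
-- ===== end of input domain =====

-- B replaces A's one-token-at-a-time pop loop by a single scan for the last "(" plus one
-- slice (alternative decomposition). Both A and B mutate the caller's list identically
-- (A pops, B deletes a suffix); the equivalence proved here is about the RETURN value.


-- ===== PORT A =====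
-- A's while-loop, on the reversed stack so that 'stack.pop()' is taking the head;
-- 'l' is the accumulator list, appended to exactly as in the Python.
def parseFuncArgsLoopA : List String → List String → List String
  | [], l => l
  | t :: rest, l =>
      let l := l ++ [t]
      if t == "(" then
        -- loop exits; 'if stack: l.append(stack.pop())' pops the function name
        match rest with
        | [] => l
        | f :: _ => l ++ [f]
      else parseFuncArgsLoopA rest l

def parse_func_arguments (stack : List String) : List String :=
  (parseFuncArgsLoopA stack.reverse []).reverse

-- ===== PORT B =====
def parse_func_arguments_alt (stack : List String) : List String :=
  let n := stack.length
  let k : Nat :=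
    match PySem.List.index? stack.reverse "(" with
    | some j => let k := j + 1; if k < n then k + 1 else k
    | none => n
  stack.drop (n - k)

-- ===== PRECONDITION & SPEC =====
def Spec_parse_func_arguments (stack : List String) (out : List String) : Prop := out = parse_func_arguments_alt stack
instance (stack : List String) (out : List String) : Decidable (Spec_parse_func_arguments stack out) := by unfold Spec_parse_func_arguments; infer_instance

-- ===== CLAIM (what is proved, stated in full; the proofs are below) =====
def Claim_equal_parse_func_arguments : Prop := ∀ (stack : List String), Dom_parse_func_arguments stack → Spec_parse_func_arguments stack (parse_func_arguments stack)

-- ===== LEMMAS AND PROOFS =====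

theorem loopA_acc (r : List String) : ∀ l, parseFuncArgsLoopA r l = l ++ parseFuncArgsLoopA r [] := by
  induction r with
  | nil => intro l; simp [parseFuncArgsLoopA]
  | cons t rest ih =>
      intro l
      by_cases ht : t = "("
      · cases rest <;> simp [parseFuncArgsLoopA, ht]
      · simp only [parseFuncArgsLoopA, beq_iff_eq, if_neg ht]
        simp only [List.nil_append]
        rw [ih (l ++ [t]), ih ([t])]
        simp

-- Pushing a non-'(' token onto the stack just appends it to B's result.
theorem alt_snoc (s : List String) (t : String) (ht : ¬ t = "(") :
    parse_func_arguments_alt (s ++ [t]) = parse_func_arguments_alt s ++ [t] := by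
  unfold parse_func_arguments_alt
  simp only [List.reverse_append, List.reverse_cons, List.reverse_nil, List.nil_append,
    List.length_append, List.length_cons, List.length_nil, List.singleton_append]
  rw [PySem.List.index?_cons_of_ne _ ht]
  cases h : PySem.List.index? s.reverse "(" with
  | none => simp
  | some j =>
      obtain ⟨hk, -, -⟩ := PySem.List.getElem_of_index?_eq_some h
      simp only [List.length_reverse] at hk
      simp only [Option.map_some]
      by_cases hc : j + 1 < s.length
      · rw [if_pos hc, if_pos (show j + 1 + 1 < s.length + (0 + 1) by omega)]
        rw [show s.length + (0 + 1) - (j + 1 + 1 + 1) = s.length - (j + 1 + 1) by omega]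
        exact List.drop_append_of_le_length (by omega)
      · rw [if_neg hc, if_neg (show ¬ j + 1 + 1 < s.length + (0 + 1) by omega)]
        rw [show s.length + (0 + 1) - (j + 1 + 1) = s.length - (j + 1) by omega]
        exact List.drop_append_of_le_length (by omega)

theorem key (r : List String) :
    (parseFuncArgsLoopA r []).reverse = parse_func_arguments_alt r.reverse := by
  induction r with
  | nil => decide
  | cons t rest ih =>
    by_cases ht : t = "("
    · subst ht
      cases rest with
      | nil => decide
      | cons f rs =>
          simp only [parseFuncArgsLoopA, beq_self_eq_true, if_pos, List.nil_append]
          unfold parse_func_arguments_alt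
          simp only [List.reverse_cons]
          rw [show ((rs.reverse ++ [f]) ++ ["("]).reverse = "(" :: f :: rs by simp]
          rw [PySem.List.index?_cons_self]
          simp only [List.length_append, List.length_reverse, List.length_cons, List.length_nil]
          rw [if_pos (by omega)]
          rw [show rs.length + (0 + 1) + (0 + 1) - (0 + 1 + 1) = rs.reverse.length by simp]
          rw [List.append_assoc, List.drop_left]
          simp
    · simp only [parseFuncArgsLoopA, beq_iff_eq, if_neg ht, List.nil_append]
      rw [loopA_acc]
      simp only [List.reverse_append, List.reverse_cons, List.reverse_nil, List.nil_append]
      rw [ih]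
      exact (alt_snoc _ _ ht).symm

theorem parse_func_arguments_spec : Claim_equal_parse_func_arguments := by
  intro stack _
  unfold Spec_parse_func_arguments parse_func_arguments
  rw [key stack.reverse, List.reverse_reverse]
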